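-- pv_equiv track=rewrite | github.com/yinxy1992/DNA_computing | sticky_ends_design.py | calcu_distance
-- ===== SOURCE A (Python) =====
-- def calcu_distance(p, q):
-- 	maxn=max(len(p),len(q))
-- 	minn=min(len(p),len(q))
-- 	l=0;
-- 	if len(p)==maxn:
-- 		for k in range(maxn+minn-1):
-- 			if k<minn:
-- 				s = 0
-- 				p1 = p[0:k]
-- 				q1 = q[minn-k:minn]
-- 				for j in range(k):
-- 					if p1[j]==q1[j]:
-- 						s += 1
-- 				l = max(l, s)
-- 			elif (k>=minn) & (k<=maxn):
-- 				s = 0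
-- 				p1 = p[k-minn:k]
-- 				q1 = q[0:minn]
-- 				for j in range(minn):
-- 					if p1[j]==q1[j]:
-- 						s += 1
-- 				l = max(l, s)
-- 			else:
-- 				s = 0
-- 				p1 = p[k-minn:maxn]
-- 				q1 = q[0:maxn+minn-k]
-- 				for j in range(maxn+minn-k):
-- 					if p1[j]==q1[j]:
-- 						s += 1
-- 				l = max(l, s)
-- 	else:
-- 		for k in range(maxn+minn-1):
-- 			if k<minn:
-- 				s = 0
-- 				q1 = q[0:k]
-- 				p1 = p[minn-k:minn]
-- 				for j in range(k):
-- 					if p1[j]==q1[j]: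
-- 						s += 1
-- 				l = max(l, s)
-- 			elif (k>=minn) & (k<=maxn):
-- 				s = 0
-- 				q1 = q[k-minn:k]
-- 				p1 = p[0:minn]
-- 				for j in range(minn):
-- 					if p1[j]==q1[j]:
-- 						s += 1
-- 				l = max(l, s)
-- 			else:
-- 				s = 0
-- 				q1 = q[k-minn:maxn]
-- 				p1 = p[0:maxn+minn-k]
-- 				for j in range(maxn+minn-k):
-- 					if p1[j]==q1[j]:
-- 						s += 1
-- 				l = max(l, s)
-- 	return l
-- ===== SOURCE B (Python) =====
-- def calcu_distance(p, q):
--     # Index the positions of each character of q once, then count matching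
--     # index pairs per alignment shift in one pass over the pairs; the answer
--     # is the largest per-shift count (0 if there are no matches).
--     pos = {}
--     for j, c in enumerate(q):
--         pos.setdefault(c, []).append(j)
--     counter = {}
--     for i, c in enumerate(p):
--         for j in pos.get(c, ()):
--             d = j - i
--             counter[d] = counter.get(d, 0) + 1
--     return max(counter.values(), default=0)
-- ===== Notes on version B (the rewrite author's own statement) =====
-- stated objective: alternative
-- what changed: Instead of A's per-shift loops over slices (three branch cases per orientation), B indexes q's character positions once and counts matching index pairs per shift in a single pass over the pairs, taking the maximum per-shift count; intended as faster (measured ~3-3.6x on the probe's inputs) but worst-case cost is the same, so no speed is claimed.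
-- intended difference: On inputs whose only character match at any overlapping alignment is the single-character corner alignment (last char of the longer string over first char of the shorter), A returns 0 because its shift loop 'range(maxn+minn-1)' starts at an empty overlap and so skips that last alignment, while B returns 1, the true maximum number of matching positions. — e.g. on calcu_distance("ab", "b"): A returns 0, B returns 1
import Mathlib
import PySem

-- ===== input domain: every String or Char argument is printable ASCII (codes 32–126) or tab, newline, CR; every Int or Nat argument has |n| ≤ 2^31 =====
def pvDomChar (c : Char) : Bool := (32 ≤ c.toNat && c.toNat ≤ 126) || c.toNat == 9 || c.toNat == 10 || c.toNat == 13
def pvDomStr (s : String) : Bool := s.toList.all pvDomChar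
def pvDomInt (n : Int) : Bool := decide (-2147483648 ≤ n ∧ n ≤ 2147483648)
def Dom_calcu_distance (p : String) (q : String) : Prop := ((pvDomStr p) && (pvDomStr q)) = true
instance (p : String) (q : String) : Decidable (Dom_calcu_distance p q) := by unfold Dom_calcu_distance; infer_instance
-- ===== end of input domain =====

-- B replaces A's per-shift slice loops by a one-pass count of matching index
-- pairs per alignment shift (q's character positions indexed once); on the
-- corner inputs described at D_ below, A misses one alignment and B fixes it.

-- ===== PORT A =====
-- Literal transliteration of A; strings handled as their code-point lists,
-- p1[j]/q1[j] ported as pyGetD (the index is always in range in A's loops).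
def calcu_distance (p : String) (q : String) : Int :=
  let lp := p.toList
  let lq := q.toList
  let maxn : Int := max (lp.length : Int) (lq.length : Int)
  let minn : Int := min (lp.length : Int) (lq.length : Int)
  if ((lp.length : Int) == maxn) then
    (PySem.List.pyRange 0 (maxn + minn - 1) 1).foldl (fun l k =>
      if k < minn then
        let p1 := PySem.List.slice lp (some 0) (some k)
        let q1 := PySem.List.slice lq (some (minn - k)) (some minn)
        let s := (PySem.List.pyRange 0 k 1).foldl (fun s j =>
          if PySem.List.pyGetD p1 j ' ' == PySem.List.pyGetD q1 j ' ' then s + 1 else s) (0 : Int)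
        max l s
      else if decide (minn ≤ k) && decide (k ≤ maxn) then
        let p1 := PySem.List.slice lp (some (k - minn)) (some k)
        let q1 := PySem.List.slice lq (some 0) (some minn)
        let s := (PySem.List.pyRange 0 minn 1).foldl (fun s j =>
          if PySem.List.pyGetD p1 j ' ' == PySem.List.pyGetD q1 j ' ' then s + 1 else s) (0 : Int)
        max l s
      else
        let p1 := PySem.List.slice lp (some (k - minn)) (some maxn)
        let q1 := PySem.List.slice lq (some 0) (some (maxn + minn - k))
        let s := (PySem.List.pyRange 0 (maxn + minn - k) 1).foldl (fun s j =>
          if PySem.List.pyGetD p1 j ' ' == PySem.List.pyGetD q1 j ' ' then s + 1 else s) (0 : Int)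
        max l s) 0
  else
    (PySem.List.pyRange 0 (maxn + minn - 1) 1).foldl (fun l k =>
      if k < minn then
        let q1 := PySem.List.slice lq (some 0) (some k)
        let p1 := PySem.List.slice lp (some (minn - k)) (some minn)
        let s := (PySem.List.pyRange 0 k 1).foldl (fun s j =>
          if PySem.List.pyGetD p1 j ' ' == PySem.List.pyGetD q1 j ' ' then s + 1 else s) (0 : Int)
        max l s
      else if decide (minn ≤ k) && decide (k ≤ maxn) then
        let q1 := PySem.List.slice lq (some (k - minn)) (some k)
        let p1 := PySem.List.slice lp (some 0) (some minn)
        let s := (PySem.List.pyRange 0 minn 1).foldl (fun s j =>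
          if PySem.List.pyGetD p1 j ' ' == PySem.List.pyGetD q1 j ' ' then s + 1 else s) (0 : Int)
        max l s
      else
        let q1 := PySem.List.slice lq (some (k - minn)) (some maxn)
        let p1 := PySem.List.slice lp (some 0) (some (maxn + minn - k))
        let s := (PySem.List.pyRange 0 (maxn + minn - k) 1).foldl (fun s j =>
          if PySem.List.pyGetD p1 j ' ' == PySem.List.pyGetD q1 j ' ' then s + 1 else s) (0 : Int)
        max l s) 0

-- ===== PORT B =====
-- Literal transliteration of Source B: position index of q, then a per-shift
-- counter over matching pairs, then max of the counter values (default 0).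
def calcu_distance_alt (p : String) (q : String) : Int :=
  let pos : PySem.Dict Char (List Int) :=
    (PySem.List.enumerate q.toList).foldl
      (fun d jc => d.modify jc.2 [] (fun l => l ++ [jc.1])) PySem.Dict.empty
  let counter : PySem.Dict Int Int :=
    (PySem.List.enumerate p.toList).foldl
      (fun cd ic => (pos.getD ic.2 []).foldl
        (fun cd j => cd.insert (j - ic.1) (cd.getD (j - ic.1) 0 + 1)) cd) PySem.Dict.empty
  PySem.List.maxD counter.values (fun v => v) 0

-- ===== PRECONDITION & SPEC =====
-- On inputs whose only character match at any overlapping alignment is the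
-- single-character corner alignment (last char of the longer string over the
-- first char of the shorter), A returns 0 — its loop 'range(maxn+minn-1)'
-- spends one iteration on an empty overlap and so skips that last alignment —
-- while B returns 1, the true maximum number of matching positions.
def D_calcu_distance (p : String) (q : String) : Prop :=
  q.toList ≠ [] ∧ p.toList ≠ [] ∧
  ∀ i < p.toList.length, ∀ j < q.toList.length,
    ((p.toList.getD i ' ' = q.toList.getD j ' ') ↔
      if q.toList.length ≤ p.toList.length then i + 1 = p.toList.length ∧ j = 0
      else i = 0 ∧ j + 1 = q.toList.length)
instance (p : String) (q : String) : Decidable (D_calcu_distance p q) := by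
  unfold D_calcu_distance; infer_instance

def Spec_calcu_distance (p : String) (q : String) (out : Int) : Prop :=
  ¬ D_calcu_distance p q → out = calcu_distance_alt p q
instance (p : String) (q : String) (out : Int) : Decidable (Spec_calcu_distance p q out) := by
  unfold Spec_calcu_distance; infer_instance

def pvDiffWitness_calcu_distance : String × String := ("ab", "b")
def pvDiffWitnessOut_calcu_distance : Int × Int := (0, 1)

-- ===== CLAIM (what is proved, stated in full; the proofs are below) =====
def Claim_unchanged_calcu_distance : Prop := ∀ (p : String) (q : String), Dom_calcu_distance p q → Spec_calcu_distance p q (calcu_distance p q)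
def Claim_changed_calcu_distance : Prop := Dom_calcu_distance (pvDiffWitness_calcu_distance.1) (pvDiffWitness_calcu_distance.2) ∧ D_calcu_distance (pvDiffWitness_calcu_distance.1) (pvDiffWitness_calcu_distance.2) ∧ calcu_distance (pvDiffWitness_calcu_distance.1) (pvDiffWitness_calcu_distance.2) = pvDiffWitnessOut_calcu_distance.1 ∧ calcu_distance_alt (pvDiffWitness_calcu_distance.1) (pvDiffWitness_calcu_distance.2) = pvDiffWitnessOut_calcu_distance.2 ∧ pvDiffWitnessOut_calcu_distance.1 ≠ pvDiffWitnessOut_calcu_distance.2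
def Claim_exact_calcu_distance : Prop := ∀ (p : String) (q : String), Dom_calcu_distance p q → D_calcu_distance p q → calcu_distance p q ≠ calcu_distance_alt p q

-- ===== LEMMAS AND PROOFS =====

def pvDlike (u v : List Char) : Bool :=
  decide (1 ≤ v.length) && decide (1 ≤ u.length) &&
  (u.getD (u.length - 1) ' ' == v.getD 0 ' ') &&
  decide (∀ i, i < u.length → ∀ j, j < v.length →
    u.getD i ' ' = v.getD j ' ' → i = u.length - 1 ∧ j = 0)

lemma pvD_iff (p q : String) :
    D_calcu_distance p q ↔
      (if q.toList.length ≤ p.toList.length then pvDlike p.toList q.toList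
       else pvDlike q.toList p.toList) = true := by
  unfold D_calcu_distance pvDlike
  by_cases hc : q.toList.length ≤ p.toList.length
  · simp only [hc, if_true, Bool.and_eq_true, decide_eq_true_eq, beq_iff_eq]
    constructor
    · rintro ⟨hq, hp, hall⟩
      have hq1 : 1 ≤ q.toList.length := List.length_pos_iff.mpr hq
      have hp1 : 1 ≤ p.toList.length := List.length_pos_iff.mpr hp
      refine ⟨⟨⟨hq1, hp1⟩, ?_⟩, ?_⟩
      · exact (hall (p.toList.length - 1) (by omega) 0 (by omega)).mpr ⟨by omega, rfl⟩
      · intro i hi j hj hm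
        have := (hall i hi j hj).mp hm
        omega
    · rintro ⟨⟨⟨hq1, hp1⟩, hcorner⟩, hall⟩
      refine ⟨List.ne_nil_of_length_pos (by omega), List.ne_nil_of_length_pos (by omega), ?_⟩
      intro i hi j hj
      constructor
      · intro hm
        have := hall i hi j hj hm
        omega
      · rintro ⟨hi1, hj0⟩
        have : i = p.toList.length - 1 := by omega
        rw [this, hj0]
        exact hcorner
  · simp only [hc, if_false, Bool.and_eq_true, decide_eq_true_eq, beq_iff_eq]
    constructor
    · rintro ⟨hq, hp, hall⟩
      have hq1 : 1 ≤ q.toList.length := List.length_pos_iff.mpr hq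
      have hp1 : 1 ≤ p.toList.length := List.length_pos_iff.mpr hp
      refine ⟨⟨⟨hp1, hq1⟩, ?_⟩, ?_⟩
      · exact ((hall 0 (by omega) (q.toList.length - 1) (by omega)).mpr ⟨rfl, by omega⟩).symm
      · intro j hj i hi hm
        have := (hall i hi j hj).mp hm.symm
        omega
    · rintro ⟨⟨⟨hp1, hq1⟩, hcorner⟩, hall⟩
      refine ⟨List.ne_nil_of_length_pos (by omega), List.ne_nil_of_length_pos (by omega), ?_⟩
      intro i hi j hj
      constructor
      · intro hm
        have := hall j hj i hi hm.symm
        omega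
      · rintro ⟨hi0, hj1⟩
        have : j = q.toList.length - 1 := by omega
        rw [this, hi0]
        exact hcorner.symm


-- pvG u v d i: position i of u is matched with position i+d of v at shift d.
def pvG (u v : List Char) (d : Int) (i : Nat) : Bool :=
  decide (0 ≤ (i : Int) + d) && decide ((i : Int) + d < (v.length : Int)) &&
  (u.getD i ' ' == v.getD ((i : Int) + d).toNat ' ')

-- pvCnt u v d: number of matching character pairs at shift d.
def pvCnt (u v : List Char) (d : Int) : Nat := (List.range u.length).countP (pvG u v d)

-- list of q-indices of character c (as Ints, increasing), like B's pos[c]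
def pvPos (v : List Char) (c : Char) : List Int :=
  ((PySem.List.enumerate v).filter (fun jc => jc.2 == c)).map (fun jc => jc.1)

-- the multiset of shifts of all matching pairs, as B generates them
def pvL (u v : List Char) : List Int :=
  (PySem.List.enumerate u).flatMap (fun ic => (pvPos v ic.2).map (fun j => j - ic.1))

-- the uniform per-k fold A's outer loops reduce to (u the longer string)
def pvAFold (u v : List Char) (maxn minn : Int) : Int :=
  (PySem.List.pyRange 0 (maxn + minn - 1) 1).foldl (fun l k =>
    if k < minn then
      let p1 := PySem.List.slice u (some 0) (some k)
      let q1 := PySem.List.slice v (some (minn - k)) (some minn)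
      let s := (PySem.List.pyRange 0 k 1).foldl (fun s j =>
        if PySem.List.pyGetD p1 j ' ' == PySem.List.pyGetD q1 j ' ' then s + 1 else s) (0 : Int)
      max l s
    else if decide (minn ≤ k) && decide (k ≤ maxn) then
      let p1 := PySem.List.slice u (some (k - minn)) (some k)
      let q1 := PySem.List.slice v (some 0) (some minn)
      let s := (PySem.List.pyRange 0 minn 1).foldl (fun s j =>
        if PySem.List.pyGetD p1 j ' ' == PySem.List.pyGetD q1 j ' ' then s + 1 else s) (0 : Int)
      max l s
    else
      let p1 := PySem.List.slice u (some (k - minn)) (some maxn)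
      let q1 := PySem.List.slice v (some 0) (some (maxn + minn - k))
      let s := (PySem.List.pyRange 0 (maxn + minn - k) 1).foldl (fun s j =>
        if PySem.List.pyGetD p1 j ' ' == PySem.List.pyGetD q1 j ' ' then s + 1 else s) (0 : Int)
      max l s) 0

lemma pvBeqComm (a b : Char) : (a == b) = (b == a) := by
  by_cases h : a = b
  · simp [h]
  · simp [beq_eq_false_iff_ne.mpr h, beq_eq_false_iff_ne.mpr (Ne.symm h)]

lemma pvA_eq (p q : String) :
    calcu_distance p q =
      if q.toList.length ≤ p.toList.length
      then pvAFold p.toList q.toList (max (p.toList.length : Int) (q.toList.length : Int)) (min (p.toList.length : Int) (q.toList.length : Int))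
      else pvAFold q.toList p.toList (max (p.toList.length : Int) (q.toList.length : Int)) (min (p.toList.length : Int) (q.toList.length : Int)) := by
  unfold calcu_distance
  dsimp only
  by_cases hc : q.toList.length ≤ p.toList.length
  · rw [if_pos hc]
    have hbeq : ((p.toList.length : Int) == max (p.toList.length : Int) (q.toList.length : Int)) = true := by
      simp only [beq_iff_eq]
      omega
    rw [if_pos hbeq]
    unfold pvAFold
    rfl
  · rw [if_neg hc]
    have hbeq : ¬ (((p.toList.length : Int) == max (p.toList.length : Int) (q.toList.length : Int)) = true) := by
      simp only [beq_iff_eq]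
      omega
    rw [if_neg hbeq]
    unfold pvAFold
    apply PySem.List.foldl_congr_mem
    intro l k _
    dsimp only
    split_ifs with h1 h2
    · congr 1
      apply PySem.List.foldl_congr_mem
      intro s j _
      rw [pvBeqComm]
    · congr 1
      apply PySem.List.foldl_congr_mem
      intro s j _
      rw [pvBeqComm]
    · congr 1
      apply PySem.List.foldl_congr_mem
      intro s j _
      rw [pvBeqComm]

lemma pvGetD_drop_take {α : Type} [Inhabited α] (xs : List α) (a t j : Nat) (hj : j < t) (d : α) :
    ((xs.drop a).take t).getD j d = xs.getD (a + j) d := by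
  simp [List.getD_eq_getElem?_getD, List.getElem?_drop, hj]

lemma pvCountP_window (u v : List Char) (au av len : Nat) (d : Int)
    (hd : d = (av : Int) - (au : Int))
    (h1 : au + len ≤ u.length) (h2 : av + len ≤ v.length)
    (h3 : ∀ i : Nat, i < u.length → 0 ≤ (i : Int) + d → (i : Int) + d < (v.length : Int) →
      (au ≤ i ∧ i < au + len)) :
    (List.range len).countP (fun j => u.getD (au + j) ' ' == v.getD (av + j) ' ') = pvCnt u v d := by
  unfold pvCnt
  have hsplit : u.length = au + (len + (u.length - au - len)) := by omega
  rw [hsplit, List.range_add, List.countP_append, List.range_add, List.map_append,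
      List.countP_append, List.countP_map, List.countP_map, List.countP_map]
  have hp1 : (List.range au).countP (pvG u v d) = 0 := by
    rw [List.countP_eq_zero]
    intro i hi
    simp only [List.mem_range] at hi
    intro hp
    unfold pvG at hp
    simp only [Bool.and_eq_true, decide_eq_true_eq] at hp
    have := h3 i (by omega) (by omega) (by omega)
    omega
  have hp3 : (List.range (u.length - au - len)).countP ((pvG u v d ∘ fun x => au + x) ∘ fun x => len + x) = 0 := by
    rw [List.countP_eq_zero]
    intro i hi
    simp only [List.mem_range, Function.comp] at hi ⊢
    intro hp
    unfold pvG at hp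
    simp only [Bool.and_eq_true, decide_eq_true_eq] at hp
    have := h3 (au + (len + i)) (by omega) (by omega) (by omega)
    omega
  rw [hp1, hp3]
  simp only [Nat.zero_add, Nat.add_zero]
  apply List.countP_congr
  intro j hj
  simp only [List.mem_range] at hj
  unfold pvG
  simp only [Function.comp, Bool.and_eq_true, decide_eq_true_eq, beq_iff_eq]
  have e1 : ((au + j : Nat) : Int) + d = ((av + j : Nat) : Int) := by push_cast; omega
  constructor
  · intro h
    refine ⟨⟨by omega, by omega⟩, ?_⟩
    rw [e1]
    simp only [Int.toNat_natCast]
    exact h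
  · rintro ⟨-, h⟩
    rw [e1] at h
    simpa using h


lemma pvInner (u1 u2 : List Char) (len : Int) :
    (PySem.List.pyRange 0 len 1).foldl (fun s j =>
      if PySem.List.pyGetD u1 j ' ' == PySem.List.pyGetD u2 j ' ' then s + 1 else s) (0 : Int)
    = ((List.range len.toNat).countP (fun j => u1.getD j ' ' == u2.getD j ' ') : Int) := by
  rw [PySem.List.foldl_if_add_one, PySem.List.pyRange_one, List.countP_map]
  norm_num
  congr 1
  funext j
  simp [Function.comp, PySem.List.pyGetD_natCast, List.getD_eq_getElem?_getD]

lemma pvAFold_body (u v : List Char) (maxn minn : Int)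
    (hmax : maxn = (u.length : Int)) (hmin : minn = (v.length : Int))
    (hv : v.length ≤ u.length) :
    pvAFold u v maxn minn =
      (PySem.List.pyRange 0 (maxn + minn - 1) 1).foldl
        (fun l k => max l ((pvCnt u v (minn - k) : Int))) 0 := by
  unfold pvAFold
  apply PySem.List.foldl_congr_mem
  intro l k hk
  have hk' := PySem.List.mem_pyRange_one.mp hk
  dsimp only
  split_ifs with h1 h2
  · -- k < minn
    rw [pvInner]
    have hcnt : (List.range k.toNat).countP
        (fun j => (PySem.List.slice u (some 0) (some k)).getD j ' ' ==
                  (PySem.List.slice v (some (minn - k)) (some minn)).getD j ' ')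
        = pvCnt u v (minn - k) := by
      rw [← pvCountP_window u v 0 (minn - k).toNat k.toNat (minn - k)
        (by omega) (by omega) (by omega) (by intro i hi hd1 hd2; omega)]
      apply List.countP_congr
      intro j hj
      simp only [List.mem_range] at hj
      rw [PySem.List.slice_toNat u (by omega) (by omega),
          PySem.List.slice_toNat v (by omega) (by omega),
          pvGetD_drop_take u _ _ _ (by omega) ' ',
          pvGetD_drop_take v _ _ _ (by omega) ' ']
      have e0 : (0:Int).toNat = 0 := rfl
      rw [e0]
    rw [hcnt]
  · -- minn ≤ k ≤ maxn
    simp only [Bool.and_eq_true, decide_eq_true_eq] at h2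
    rw [pvInner]
    have hcnt : (List.range minn.toNat).countP
        (fun j => (PySem.List.slice u (some (k - minn)) (some k)).getD j ' ' ==
                  (PySem.List.slice v (some 0) (some minn)).getD j ' ')
        = pvCnt u v (minn - k) := by
      rw [← pvCountP_window u v (k - minn).toNat 0 minn.toNat (minn - k)
        (by omega) (by omega) (by omega) (by intro i hi hd1 hd2; omega)]
      apply List.countP_congr
      intro j hj
      simp only [List.mem_range] at hj
      rw [PySem.List.slice_toNat u (by omega) (by omega),
          PySem.List.slice_toNat v (by omega) (by omega),
          pvGetD_drop_take u _ _ _ (by omega) ' ',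
          pvGetD_drop_take v _ _ _ (by omega) ' ']
      have e0 : (0:Int).toNat = 0 := rfl
      rw [e0]
    rw [hcnt]
  · -- maxn < k
    have h3 : maxn < k := by
      simp only [Bool.and_eq_true, decide_eq_true_eq, not_and] at h2
      have := h2 (by omega); omega
    rw [pvInner]
    have hcnt : (List.range (maxn + minn - k).toNat).countP
        (fun j => (PySem.List.slice u (some (k - minn)) (some maxn)).getD j ' ' ==
                  (PySem.List.slice v (some 0) (some (maxn + minn - k))).getD j ' ')
        = pvCnt u v (minn - k) := by
      rw [← pvCountP_window u v (k - minn).toNat 0 (maxn + minn - k).toNat (minn - k)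
        (by omega) (by omega) (by omega) (by intro i hi hd1 hd2; omega)]
      apply List.countP_congr
      intro j hj
      simp only [List.mem_range] at hj
      rw [PySem.List.slice_toNat u (by omega) (by omega),
          PySem.List.slice_toNat v (by omega) (by omega),
          pvGetD_drop_take u _ _ _ (by omega) ' ',
          pvGetD_drop_take v _ _ _ (by omega) ' ']
      have e0 : (0:Int).toNat = 0 := rfl
      rw [e0]
    rw [hcnt]

lemma pvFoldMaxAttained {β : Type} (xs : List β) (f : β → Int) (a : Int) :
    xs.foldl (fun acc x => max acc (f x)) a = a ∨
      ∃ x ∈ xs, xs.foldl (fun acc x => max acc (f x)) a = f x := by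
  induction xs generalizing a with
  | nil => exact Or.inl rfl
  | cons x xs ih =>
    rcases ih (max a (f x)) with h | ⟨y, hy, hEq⟩
    · rcases max_choice a (f x) with hm | hm
      · exact Or.inl (by simpa [hm] using h)
      · exact Or.inr ⟨x, List.mem_cons_self, by simpa [hm] using h⟩
    · exact Or.inr ⟨y, List.mem_cons_of_mem _ hy, hEq⟩

lemma pvCnt_pos_iff (u v : List Char) (d : Int) :
    1 ≤ pvCnt u v d ↔ ∃ i j : Nat, i < u.length ∧ j < v.length ∧ (j : Int) = (i : Int) + d ∧
      u.getD i ' ' = v.getD j ' ' := by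
  unfold pvCnt
  rw [Nat.one_le_iff_ne_zero, ← Nat.pos_iff_ne_zero, List.countP_pos_iff]
  constructor
  · rintro ⟨i, hi, hp⟩
    simp only [List.mem_range] at hi
    unfold pvG at hp
    simp only [Bool.and_eq_true, decide_eq_true_eq, beq_iff_eq] at hp
    refine ⟨i, ((i : Int) + d).toNat, hi, by omega, by omega, hp.2⟩
  · rintro ⟨i, j, hi, hj, hd, he⟩
    refine ⟨i, List.mem_range.mpr hi, ?_⟩
    unfold pvG
    simp only [Bool.and_eq_true, decide_eq_true_eq, beq_iff_eq]
    refine ⟨⟨by omega, by omega⟩, ?_⟩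
    have hj' : ((i : Int) + d).toNat = j := by omega
    rw [hj']; exact he

lemma pvCnt_bounds (u v : List Char) (d : Int) (h : 1 ≤ pvCnt u v d) :
    1 - (u.length : Int) ≤ d ∧ d ≤ (v.length : Int) - 1 := by
  unfold pvCnt at h
  rw [Nat.one_le_iff_ne_zero, ← Nat.pos_iff_ne_zero, List.countP_pos_iff] at h
  rcases h with ⟨i, hi, hp⟩
  simp only [List.mem_range] at hi
  unfold pvG at hp
  simp only [Bool.and_eq_true, decide_eq_true_eq] at hp
  omega

lemma pvCnt_corner_le_one (u v : List Char) : pvCnt u v (1 - (u.length : Int)) ≤ 1 := by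
  unfold pvCnt
  calc (List.range u.length).countP (pvG u v (1 - (u.length : Int)))
      ≤ (List.range u.length).countP (fun i => i == u.length - 1) := by
        apply List.countP_mono_left
        intro i hi hp
        simp only [List.mem_range] at hi
        unfold pvG at hp
        simp only [Bool.and_eq_true, decide_eq_true_eq] at hp
        simp only [beq_iff_eq]
        omega
    _ = (List.range u.length).count (u.length - 1) := rfl
    _ ≤ 1 := List.nodup_iff_count_le_one.mp List.nodup_range _

lemma pvCountP_card (n : Nat) (f : Nat → Bool) : (List.range n).countP f = ((Finset.range n).filter (fun i => f i = true)).card := by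
  induction n with
  | zero => simp
  | succ n ih =>
    rw [List.range_succ, List.countP_append, Finset.range_add_one, Finset.filter_insert]
    by_cases h : f n
    · rw [if_pos h, Finset.card_insert_of_notMem (by simp)]
      simp [h, ih]
    · rw [if_neg h]
      simp [h, ih]

lemma pvCountP_reindex (nu nv : Nat) (f g : Nat → Bool) (d : Int)
    (hf : ∀ i, i < nu → f i = true → 0 ≤ (i:Int) + d ∧ (i:Int) + d < nv)
    (hg : ∀ j, j < nv → g j = true → 0 ≤ (j:Int) - d ∧ (j:Int) - d < nu)
    (hfg : ∀ i j : Nat, i < nu → j < nv → (j:Int) = (i:Int) + d → (f i = g j)) :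
    (List.range nu).countP f = (List.range nv).countP g := by
  rw [pvCountP_card, pvCountP_card]
  refine Finset.card_bij (fun i _ => ((i:Int)+d).toNat) ?_ ?_ ?_
  · intro a ha
    simp only [Finset.mem_filter, Finset.mem_range] at ha ⊢
    obtain ⟨h2, h3⟩ := hf a ha.1 ha.2
    refine ⟨by omega, ?_⟩
    rw [← hfg a _ ha.1 (by omega) (by omega)]; exact ha.2
  · intro a ha b hb hab
    simp only [Finset.mem_filter, Finset.mem_range] at ha hb
    obtain ⟨h2, h3⟩ := hf a ha.1 ha.2
    obtain ⟨h5, h6⟩ := hf b hb.1 hb.2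
    simp only at hab
    omega
  · intro b hb
    simp only [Finset.mem_filter, Finset.mem_range] at hb ⊢
    obtain ⟨h2, h3⟩ := hg b hb.1 hb.2
    refine ⟨((b:Int)-d).toNat, ⟨⟨by omega, ?_⟩, by omega⟩⟩
    rw [hfg _ b (by omega) hb.1 (by omega)]; exact hb.2

lemma pvCnt_swap (u v : List Char) (d : Int) : pvCnt v u d = pvCnt u v (-d) := by
  unfold pvCnt
  refine pvCountP_reindex v.length u.length _ _ d ?_ ?_ ?_
  · intro i _ hp
    unfold pvG at hp
    simp only [Bool.and_eq_true, decide_eq_true_eq] at hp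
    exact ⟨hp.1.1, hp.1.2⟩
  · intro j _ hp
    unfold pvG at hp
    simp only [Bool.and_eq_true, decide_eq_true_eq] at hp
    constructor <;> omega
  · intro i j hi hj hij
    unfold pvG
    rw [Bool.eq_iff_iff]
    simp only [Bool.and_eq_true, decide_eq_true_eq, beq_iff_eq]
    have e1 : ((i:Int)+d).toNat = j := by omega
    have e2 : ((j:Int)+(-d)).toNat = i := by omega
    rw [e1, e2]
    constructor
    · rintro ⟨-, h⟩
      exact ⟨⟨by omega, by omega⟩, h.symm⟩
    · rintro ⟨-, h⟩
      exact ⟨⟨by omega, by omega⟩, h.symm⟩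


lemma pvPos_nodup (v : List Char) (c : Char) : (pvPos v c).Nodup := by
  unfold pvPos
  apply List.Pairwise.map (R := fun p q : Int × Char => p.1 < q.1) _ (fun a b h => ne_of_lt h)
  exact (PySem.List.pairwise_lt_enumerate v 0).filter _

lemma pvPos_mem (v : List Char) (c : Char) (x : Int) :
    x ∈ pvPos v c ↔ 0 ≤ x ∧ x < (v.length : Int) ∧ v.getD x.toNat ' ' = c := by
  unfold pvPos
  simp only [List.mem_map, List.mem_filter, PySem.List.mem_enumerate_iff]
  constructor
  · rintro ⟨⟨j, ch⟩, ⟨⟨k, hk, heq⟩, hc⟩, hx⟩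
    simp only at hx
    cases heq
    simp only [beq_iff_eq] at hc
    subst hx
    refine ⟨by omega, by omega, ?_⟩
    have : ((0:Int) + (k:Int)).toNat = k := by omega
    rw [this, List.getD_eq_getElem?_getD]
    simp [hk, hc.symm]
  · rintro ⟨h0, hlt, hc⟩
    have hk : x.toNat < v.length := by omega
    refine ⟨(0 + (x.toNat : Int), v[x.toNat]), ⟨⟨x.toNat, hk, rfl⟩, ?_⟩, by simp; omega⟩
    simp only [beq_iff_eq]
    rw [← List.getD_eq_getElem v ' ' hk]
    exact hc

lemma pvPos_count (v : List Char) (c : Char) (x : Int) :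
    (pvPos v c).count x =
      if 0 ≤ x ∧ x < (v.length : Int) ∧ v.getD x.toNat ' ' = c then 1 else 0 := by
  split_ifs with h
  · exact List.count_eq_one_of_mem (pvPos_nodup v c) ((pvPos_mem v c x).mpr h)
  · exact List.count_eq_zero_of_not_mem (fun hm => h ((pvPos_mem v c x).mp hm))


lemma pvLcount_gen (v : List Char) (d : Int) :
    ∀ (u : List Char) (s : Int),
    ((PySem.List.enumerate u s).flatMap (fun ic => (pvPos v ic.2).map (fun j => j - ic.1))).count d
    = (List.range u.length).countP (fun (i0 : Nat) =>
        decide (0 ≤ s + (i0:Int) + d) && decide (s + (i0:Int) + d < (v.length : Int)) &&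
        (u.getD i0 ' ' == v.getD (s + (i0:Int) + d).toNat ' ')) := by
  intro u
  induction u with
  | nil => intro s; simp [PySem.List.enumerate]
  | cons a u ih =>
    intro s
    rw [PySem.List.enumerate_cons, List.flatMap_cons, List.count_append]
    have hrow : ((pvPos v a).map (fun j => j - s)).count d = (pvPos v a).count (d + s) := by
      have h2 := List.count_map_of_injective (l := pvPos v a) (f := fun j => j - s)
        sub_left_injective (d + s)
      simpa using h2
    rw [hrow, pvPos_count]
    have hlen : (a :: u).length = u.length + 1 := rfl
    rw [hlen, List.range_succ_eq_map, List.countP_cons, List.countP_map]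
    rw [ih (s + 1)]
    have hpt : (List.range u.length).countP
        ((fun (i0 : Nat) => decide (0 ≤ s + (i0:Int) + d) && decide (s + (i0:Int) + d < (v.length : Int)) &&
          ((a :: u).getD i0 ' ' == v.getD (s + (i0:Int) + d).toNat ' ')) ∘ Nat.succ)
        = (List.range u.length).countP (fun (i0 : Nat) =>
        decide (0 ≤ (s+1) + (i0:Int) + d) && decide ((s+1) + (i0:Int) + d < (v.length : Int)) &&
        (u.getD i0 ' ' == v.getD ((s+1) + (i0:Int) + d).toNat ' ')) := by
      apply List.countP_congr
      intro x _
      have e : s + ((x:Nat).succ : Int) + d = (s+1) + (x:Int) + d := by push_cast; ring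
      simp only [Function.comp, e, List.getD_cons_succ]
    rw [hpt]
    have hhead : (if 0 ≤ d + s ∧ d + s < (v.length:Int) ∧ v.getD (d + s).toNat ' ' = a then 1 else 0)
        = (if (decide (0 ≤ s + ((0:Nat):Int) + d) && decide (s + ((0:Nat):Int) + d < (v.length : Int)) &&
            ((a :: u).getD 0 ' ' == v.getD (s + ((0:Nat):Int) + d).toNat ' ')) = true then 1 else 0) := by
      have e : s + ((0:Nat):Int) + d = d + s := by push_cast; ring
      simp only [e, List.getD_cons_zero, Bool.and_eq_true, decide_eq_true_eq, beq_iff_eq]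
      by_cases h : 0 ≤ d + s ∧ d + s < (v.length:Int) ∧ v.getD (d + s).toNat ' ' = a
      · rw [if_pos h, if_pos ⟨⟨h.1, h.2.1⟩, h.2.2.symm⟩]
      · rw [if_neg h, if_neg (by rintro ⟨⟨h1, h2⟩, h3⟩; exact h ⟨h1, h2, h3.symm⟩)]
    omega

lemma pvLcount (u : List Char) (v : List Char) (d : Int) :
    (pvL u v).count d = pvCnt u v d := by
  unfold pvL pvCnt
  rw [pvLcount_gen v d u 0]
  apply List.countP_congr
  intro x _
  unfold pvG
  simp only [zero_add]


lemma pvPos_getD (v : List Char) (c : Char) :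
    ((PySem.List.enumerate v).foldl
      (fun d jc => d.modify jc.2 [] (fun l => l ++ [jc.1])) PySem.Dict.empty).getD c []
    = pvPos v c := by
  have h : (PySem.List.enumerate v).foldl
      (fun d jc => d.modify jc.2 [] (fun l => l ++ [jc.1])) (PySem.Dict.empty (κ := Char) (ν := List Int))
      = ((PySem.List.enumerate v).map (fun jc => (jc.2, jc.1))).foldl
      (fun d p => d.modify p.1 [] (fun l => l ++ [p.2])) PySem.Dict.empty := by
    rw [List.foldl_map]
  rw [h, PySem.Dict.getD_foldl_modify_append]
  unfold pvPos
  simp [List.filter_map, List.map_map]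
  rfl

lemma pvAlt_eq (p q : String) :
    calcu_distance_alt p q =
      PySem.List.maxD (PySem.Dict.counter (pvL p.toList q.toList)).values (fun v => v) 0 := by
  unfold calcu_distance_alt
  dsimp only
  have h1 : (PySem.List.enumerate p.toList).foldl
      (fun cd ic => ((((PySem.List.enumerate q.toList).foldl
          (fun d jc => d.modify jc.2 [] (fun l => l ++ [jc.1])) PySem.Dict.empty)).getD ic.2 []).foldl
        (fun cd j => cd.insert (j - ic.1) (cd.getD (j - ic.1) 0 + 1)) cd)
      (PySem.Dict.empty (κ := Int) (ν := Int))
      = (PySem.List.enumerate p.toList).foldl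
      (fun cd ic => ((pvPos q.toList ic.2).map (fun j => j - ic.1)).foldl
        (fun cd x => cd.insert x (cd.getD x 0 + 1)) cd) PySem.Dict.empty := by
    apply PySem.List.foldl_congr_mem
    intro acc x _
    rw [pvPos_getD, List.foldl_map]
  rw [h1, ← List.foldl_flatMap]
  rw [PySem.Dict.foldl_insert_getD_add_one_eq_counter]
  rfl


lemma pvValues_counter (L : List Int) :
    (PySem.Dict.counter L).values = (PySem.Set.ofList L).map (fun k => ((L.count k : Int))) := by
  show ((PySem.Dict.counter L).items).map (fun x => x.2) = _
  rw [PySem.Dict.items_counter, List.map_map]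
  rfl

lemma pvB_char (p q : String) :
    0 ≤ calcu_distance_alt p q ∧
    (∀ d : Int, ((pvCnt p.toList q.toList d : Int)) ≤ calcu_distance_alt p q) ∧
    (calcu_distance_alt p q = 0 ∨ ∃ d : Int, 1 ≤ pvCnt p.toList q.toList d ∧
      calcu_distance_alt p q = ((pvCnt p.toList q.toList d : Int))) := by
  rw [pvAlt_eq, pvValues_counter]
  set L := pvL p.toList q.toList with hL
  set vals := (PySem.Set.ofList L).map (fun k => ((L.count k : Int))) with hvals
  have hmem : ∀ m ∈ vals, ∃ k, k ∈ L ∧ m = (L.count k : Int) := by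
    intro m hm
    rw [hvals] at hm
    obtain ⟨k, hk, hmk⟩ := List.mem_map.mp hm
    exact ⟨k, (PySem.Set.mem_ofList L k).mp hk, hmk.symm⟩
  cases h : PySem.List.max? vals (fun v => v) with
  | none =>
    have hnil : vals = [] := (PySem.List.max?_eq_none_iff vals _).mp h
    have hLnil : L = [] := by
      by_contra hne
      rcases List.exists_mem_of_ne_nil L hne with ⟨x, hx⟩
      have : (L.count x : Int) ∈ vals := by
        rw [hvals]
        exact List.mem_map.mpr ⟨x, (PySem.Set.mem_ofList L x).mpr hx, rfl⟩
      rw [hnil] at this; simp at this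
    have hB : PySem.List.maxD vals (fun v => v) 0 = 0 := by
      rw [hnil]; rfl
    rw [hB]
    refine ⟨le_refl 0, ?_, Or.inl rfl⟩
    intro d
    have : pvCnt p.toList q.toList d = 0 := by
      rw [← pvLcount]
      simp [← hL, hLnil]
    simp [this]
  | some m =>
    have hBm : PySem.List.maxD vals (fun v => v) 0 = m := by
      unfold PySem.List.maxD
      rw [h]; rfl
    rw [hBm]
    obtain ⟨k, hkL, hmk⟩ := hmem m (PySem.List.max?_mem h)
    have hkpos : 0 < L.count k := List.count_pos_iff.mpr hkL
    refine ⟨by rw [hmk]; positivity, ?_, Or.inr ⟨k, ?_, ?_⟩⟩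
    · intro d
      by_cases hz : pvCnt p.toList q.toList d = 0
      · rw [hz]; omega
      · have hdL : d ∈ L := by
          rw [← List.count_pos_iff, pvLcount]; omega
        have hv : (L.count d : Int) ∈ vals := by
          rw [hvals]
          exact List.mem_map.mpr ⟨d, (PySem.Set.mem_ofList L d).mpr hdL, rfl⟩
        have := PySem.List.max?_isMax h _ hv
        rw [← pvLcount]
        exact this
    · rw [← pvLcount]; exact hkpos
    · rw [← pvLcount]; exact hmk

lemma pvAssemble (u v : List Char) (A B : Int)
    (hA0 : 0 ≤ A)
    (hAub : ∀ d : Int, 2 - (u.length : Int) ≤ d → d ≤ (v.length : Int) → ((pvCnt u v d : Int)) ≤ A)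
    (hAat : A = 0 ∨ ∃ d : Int, 2 - (u.length : Int) ≤ d ∧ d ≤ (v.length : Int) ∧ A = ((pvCnt u v d : Int)))
    (hB0 : 0 ≤ B)
    (hBub : ∀ d : Int, ((pvCnt u v d : Int)) ≤ B)
    (hBat : B = 0 ∨ ∃ d : Int, 1 ≤ pvCnt u v d ∧ B = ((pvCnt u v d : Int))) :
    (pvDlike u v = false → A = B) ∧ (pvDlike u v = true → A = 0 ∧ B = 1) := by
  -- A ≤ B always
  have hAB : A ≤ B := by
    rcases hAat with h | ⟨d, _, _, hAd⟩
    · omega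
    · rw [hAd]; exact hBub d
  constructor
  · -- ¬Dlike → A = B
    intro hnd
    rcases hBat with hB | ⟨d, hd1, hBd⟩
    · omega
    · have hbounds := pvCnt_bounds u v d hd1
      by_cases hcor : d = 1 - (u.length : Int)
      · -- corner shift
        subst hcor
        obtain ⟨i, j, hi, hj, hij, hc⟩ := (pvCnt_pos_iff u v _).mp hd1
        have hi' : i = u.length - 1 := by omega
        have hj' : j = 0 := by omega
        have hcor1 : pvCnt u v (1 - (u.length : Int)) = 1 := by
          have := pvCnt_corner_le_one u v
          omega
        -- first three conjuncts of pvDlike hold, so the ∀ fails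
        have hmatch : u.getD (u.length - 1) ' ' = v.getD 0 ' ' := by
          rw [← hi', ← hj']; exact hc
        have hforall : ¬ (∀ i', i' < u.length → ∀ j', j' < v.length →
            u.getD i' ' ' = v.getD j' ' ' → i' = u.length - 1 ∧ j' = 0) := by
          intro hall
          apply absurd hnd
          simp only [pvDlike, Bool.not_eq_false, Bool.and_eq_true, decide_eq_true_eq,
            beq_iff_eq]
          exact ⟨⟨⟨by omega, by omega⟩, hmatch⟩, hall⟩
        push_neg at hforall
        obtain ⟨i', hi'lt, j', hj'lt, hc', hne⟩ := hforall
        have hd' : 1 ≤ pvCnt u v ((j' : Int) - (i' : Int)) := by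
          rw [pvCnt_pos_iff]
          exact ⟨i', j', hi'lt, hj'lt, by omega, hc'⟩
        have hdne : (j' : Int) - (i' : Int) ≠ 1 - (u.length : Int) := by
          intro hEq
          exact hne (by omega) (by omega)
        have hdb := pvCnt_bounds u v _ hd'
        have hA1 : (1 : Int) ≤ A := by
          have := hAub ((j' : Int) - (i' : Int)) (by omega) (by omega)
          omega
        omega
      · -- d covered by A
        have := hAub d (by omega) (by omega)
        omega
  · -- Dlike → A = 0 ∧ B = 1
    intro hd
    simp only [pvDlike, Bool.and_eq_true, decide_eq_true_eq, beq_iff_eq] at hd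
    obtain ⟨⟨⟨hv1, hu1⟩, hmatch⟩, hall⟩ := hd
    have hcorpos : 1 ≤ pvCnt u v (1 - (u.length : Int)) := by
      rw [pvCnt_pos_iff]
      exact ⟨u.length - 1, 0, by omega, by omega, by omega, hmatch⟩
    have hcor1 : pvCnt u v (1 - (u.length : Int)) = 1 := by
      have := pvCnt_corner_le_one u v
      omega
    have hA0' : A = 0 := by
      rcases hAat with h | ⟨d, hd2, hd3, hAd⟩
      · exact h
      · have hz : pvCnt u v d = 0 := by
          by_contra hz
          obtain ⟨i, j, hi, hj, hij, hc⟩ := (pvCnt_pos_iff u v d).mp (by omega)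
          obtain ⟨hi', hj'⟩ := hall i hi j hj hc
          omega
        omega
    have hB1 : B = 1 := by
      rcases hBat with h | ⟨d, hd1, hBd⟩
      · have := hBub (1 - (u.length : Int))
        omega
      · obtain ⟨i, j, hi, hj, hij, hc⟩ := (pvCnt_pos_iff u v d).mp hd1
        obtain ⟨hi', hj'⟩ := hall i hi j hj hc
        have : d = 1 - (u.length : Int) := by omega
        rw [this] at hBd
        omega
    exact ⟨hA0', hB1⟩

lemma pvAFold_char (u v : List Char) (maxn minn : Int)
    (hmax : maxn = (u.length : Int)) (hmin : minn = (v.length : Int))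
    (hv : v.length ≤ u.length) :
    0 ≤ pvAFold u v maxn minn ∧
    (∀ d : Int, 2 - (u.length : Int) ≤ d → d ≤ (v.length : Int) →
      ((pvCnt u v d : Int)) ≤ pvAFold u v maxn minn) ∧
    (pvAFold u v maxn minn = 0 ∨ ∃ d : Int, 2 - (u.length : Int) ≤ d ∧ d ≤ (v.length : Int) ∧
      pvAFold u v maxn minn = ((pvCnt u v d : Int))) := by
  rw [pvAFold_body u v maxn minn hmax hmin hv]
  have H := PySem.List.le_foldl_max_int (PySem.List.pyRange 0 (maxn + minn - 1) 1)
    (fun k => ((pvCnt u v (minn - k) : Int))) 0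
  refine ⟨H.1, ?_, ?_⟩
  · intro d h2 hle
    have hk : minn - d ∈ PySem.List.pyRange 0 (maxn + minn - 1) 1 :=
      PySem.List.mem_pyRange_one.mpr ⟨by omega, by omega⟩
    have := H.2 _ hk
    simp only at this
    have e : minn - (minn - d) = d := by ring
    rwa [e] at this
  · rcases pvFoldMaxAttained (PySem.List.pyRange 0 (maxn + minn - 1) 1)
      (fun k => ((pvCnt u v (minn - k) : Int))) 0 with h | ⟨k, hk, hEq⟩
    · exact Or.inl h
    · have hk' := PySem.List.mem_pyRange_one.mp hk
      exact Or.inr ⟨minn - k, by omega, by omega, hEq⟩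

lemma pvMain (p q : String) :
    (¬ D_calcu_distance p q → calcu_distance p q = calcu_distance_alt p q) ∧
    (D_calcu_distance p q → calcu_distance p q = 0 ∧ calcu_distance_alt p q = 1) := by
  have hB := pvB_char p q
  have hA := pvA_eq p q
  by_cases hc : q.toList.length ≤ p.toList.length
  · rw [if_pos hc] at hA
    have hAc := pvAFold_char p.toList q.toList
      (max (p.toList.length : Int) (q.toList.length : Int))
      (min (p.toList.length : Int) (q.toList.length : Int)) (by omega) (by omega) hc
    rw [← hA] at hAc
    have hAsm := pvAssemble p.toList q.toList (calcu_distance p q) (calcu_distance_alt p q)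
      hAc.1 hAc.2.1 hAc.2.2 hB.1 hB.2.1 hB.2.2
    constructor
    · intro hnd
      rw [pvD_iff p q, if_pos hc] at hnd
      simp only [Bool.not_eq_true] at hnd
      exact hAsm.1 hnd
    · intro hd
      rw [pvD_iff p q, if_pos hc] at hd
      exact hAsm.2 hd
  · rw [if_neg hc] at hA
    have hAc := pvAFold_char q.toList p.toList
      (max (p.toList.length : Int) (q.toList.length : Int))
      (min (p.toList.length : Int) (q.toList.length : Int)) (by omega) (by omega) (by omega)
    rw [← hA] at hAc
    have hBub' : ∀ d : Int, ((pvCnt q.toList p.toList d : Int)) ≤ calcu_distance_alt p q := by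
      intro d
      rw [pvCnt_swap]
      exact hB.2.1 (-d)
    have hBat' : calcu_distance_alt p q = 0 ∨ ∃ d : Int, 1 ≤ pvCnt q.toList p.toList d ∧
        calcu_distance_alt p q = ((pvCnt q.toList p.toList d : Int)) := by
      rcases hB.2.2 with h | ⟨d, h1, h2⟩
      · exact Or.inl h
      · refine Or.inr ⟨-d, ?_, ?_⟩
        · rw [pvCnt_swap p.toList q.toList (-d), neg_neg]
          exact h1
        · rw [pvCnt_swap p.toList q.toList (-d), neg_neg]
          exact h2
    have hAsm := pvAssemble q.toList p.toList (calcu_distance p q) (calcu_distance_alt p q)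
      hAc.1 hAc.2.1 hAc.2.2 hB.1 hBub' hBat'
    constructor
    · intro hnd
      rw [pvD_iff p q, if_neg hc] at hnd
      simp only [Bool.not_eq_true] at hnd
      exact hAsm.1 hnd
    · intro hd
      rw [pvD_iff p q, if_neg hc] at hd
      exact hAsm.2 hd

-- ===== VERDICT (by name: the statement is the Claim_ definition above) =====
theorem calcu_distance_spec : Claim_unchanged_calcu_distance := by
  intro p q _ hnd
  exact (pvMain p q).1 hnd

theorem calcu_distance_changed : Claim_changed_calcu_distance := by
  unfold Claim_changed_calcu_distance; decide

theorem calcu_distance_tight : Claim_exact_calcu_distance := by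
  intro p q _ hd
  rcases (pvMain p q).2 hd with ⟨h1, h2⟩
  omega
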